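-- pv_equiv track=rewrite | github.com/danielholmes839/dsc-workshops | ITI1120-final-review/solutions/.ipynb_checkpoints/q2-checkpoint.py | split_guesses
-- ===== SOURCE A (Python) =====
-- def split_guesses(guesses, answer):
--     """(list of number, number) -> dict of {str: list of number}"""
--     d = {
--         'low': [],
--         'correct': [],
--         'high': []
--     }
--
--     for num in guesses:
--         if num < answer:
--             d['low'].append(num)
--         elif num > answer:
--             d['high'].append(num)
--         else:
--             d['correct'].append(num)
--
--     if len(d['low']) == 0:
--         del d['low']
--
--     if len(d['high']) == 0:
--         del d['high']
--
--     if len(d['correct']) == 0: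
--         del d['correct']
--
--     return d
-- ===== SOURCE B (Python) =====
-- def split_guesses(guesses, answer):
--     """(list of number, number) -> dict of {str: list of number}"""
--     low = [n for n in guesses if n < answer]
--     correct = [n for n in guesses if n == answer]
--     high = [n for n in guesses if n > answer]
--     return {k: v for k, v in (('low', low), ('correct', correct), ('high', high)) if v}
-- ===== Notes on version B (the rewrite author's own statement) =====
-- stated objective: simpler
-- what changed: Replaces the single dict-mutating pass with empty-bucket deletions by three independent comprehension filters and one conditional dict-comprehension assembly.
import Mathlib
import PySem

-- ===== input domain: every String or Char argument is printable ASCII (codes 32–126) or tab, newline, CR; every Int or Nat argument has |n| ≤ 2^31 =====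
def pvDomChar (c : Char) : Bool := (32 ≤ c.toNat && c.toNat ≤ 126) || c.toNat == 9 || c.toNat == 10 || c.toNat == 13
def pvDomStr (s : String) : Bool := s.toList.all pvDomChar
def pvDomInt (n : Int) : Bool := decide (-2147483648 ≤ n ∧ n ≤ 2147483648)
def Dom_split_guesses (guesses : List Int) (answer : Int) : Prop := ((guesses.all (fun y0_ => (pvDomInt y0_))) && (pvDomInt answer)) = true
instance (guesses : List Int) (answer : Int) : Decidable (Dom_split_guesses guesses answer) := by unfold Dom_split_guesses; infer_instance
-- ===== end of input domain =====

-- B replaces A's single dict-mutating pass (plus empty-bucket deletions) by three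
-- independent filters and one conditional assembly step; objective: simpler.

-- ===== PORT A =====
-- literal port of A: a dict with three empty buckets, one mutating loop, then deletion of empty buckets
def split_guesses (guesses : List Int) (answer : Int) : List (String × List Int) :=
  let d : PySem.Dict String (List Int) :=
    ((PySem.Dict.empty.insert "low" []).insert "correct" []).insert "high" []
  let d := guesses.foldl (fun d num =>
    if num < answer then d.modify "low" [] (fun l => l ++ [num])
    else if num > answer then d.modify "high" [] (fun l => l ++ [num])
    else d.modify "correct" [] (fun l => l ++ [num])) d
  let d := if (d.getD "low" []).length = 0 then d.erase "low" else d
  let d := if (d.getD "high" []).length = 0 then d.erase "high" else d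
  let d := if (d.getD "correct" []).length = 0 then d.erase "correct" else d
  d.items

-- ===== PORT B =====
-- port of B: three comprehension filters, then conditional assembly keeping non-empty buckets
def split_guesses_alt (guesses : List Int) (answer : Int) : List (String × List Int) :=
  let low := guesses.filter (fun n => n < answer)
  let correct := guesses.filter (fun n => n == answer)
  let high := guesses.filter (fun n => n > answer)
  ([("low", low), ("correct", correct), ("high", high)] : List (String × List Int)).filter
    (fun p => !p.2.isEmpty)

-- ===== PRECONDITION & SPEC =====
def Spec_split_guesses (guesses : List Int) (answer : Int) (out : List (String × List Int)) : Prop := out = split_guesses_alt guesses answer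
instance (guesses : List Int) (answer : Int) (out : List (String × List Int)) : Decidable (Spec_split_guesses guesses answer out) := by unfold Spec_split_guesses; infer_instance

-- ===== CLAIM (what is proved, stated in full; the proofs are below) =====
def Claim_equal_split_guesses : Prop := ∀ (guesses : List Int) (answer : Int), Dom_split_guesses guesses answer → Spec_split_guesses guesses answer (split_guesses guesses answer)

-- ===== LEMMAS AND PROOFS =====

-- loop invariant for A's pass: starting from the literal three-bucket dict, the fold
-- appends each guess to the bucket picked by A's branch order
theorem split_guesses_fold_inv (answer : Int) (l : List Int) (a b c : List Int) :
    (l.foldl (fun d num =>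
      if num < answer then d.modify "low" [] (fun l => l ++ [num])
      else if num > answer then d.modify "high" [] (fun l => l ++ [num])
      else d.modify "correct" [] (fun l => l ++ [num]))
      (PySem.Dict.mk [("low", a), ("correct", b), ("high", c)]))
    = PySem.Dict.mk [("low", a ++ l.filter (fun n => n < answer)),
        ("correct", b ++ l.filter (fun n => n == answer)),
        ("high", c ++ l.filter (fun n => n > answer))] := by
  induction l generalizing a b c with
  | nil => simp
  | cons x xs ih =>
    simp only [List.foldl_cons, List.filter_cons]
    by_cases h1 : x < answer
    · have hne : ¬ (x == answer) = true := by simp; omega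
      have hng : ¬ (x > answer) := by omega
      rw [if_pos h1]
      have : (PySem.Dict.mk [("low", a), ("correct", b), ("high", c)]).modify "low" [] (fun l => l ++ [x])
          = PySem.Dict.mk [("low", a ++ [x]), ("correct", b), ("high", c)] := by
        simp [PySem.Dict.modify, PySem.Dict.getD, PySem.Dict.get?, PySem.Dict.insert]
      rw [this, ih]
      simp [h1, hne, hng]
    · by_cases h2 : x > answer
      · have hne : ¬ (x == answer) = true := by simp; omega
        rw [if_neg h1, if_pos h2]
        have : (PySem.Dict.mk [("low", a), ("correct", b), ("high", c)]).modify "high" [] (fun l => l ++ [x])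
            = PySem.Dict.mk [("low", a), ("correct", b), ("high", c ++ [x])] := by
          simp [PySem.Dict.modify, PySem.Dict.getD, PySem.Dict.get?, PySem.Dict.insert]
        rw [this, ih]
        simp [h1, hne, h2]
      · have heq : (x == answer) = true := by simp; omega
        rw [if_neg h1, if_neg h2]
        have : (PySem.Dict.mk [("low", a), ("correct", b), ("high", c)]).modify "correct" [] (fun l => l ++ [x])
            = PySem.Dict.mk [("low", a), ("correct", b ++ [x]), ("high", c)] := by
          simp [PySem.Dict.modify, PySem.Dict.getD, PySem.Dict.get?, PySem.Dict.insert]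
        rw [this, ih]
        simp [h1, heq, h2]

-- ===== VERDICT (by name: the statement is the Claim_ definition above) =====
theorem split_guesses_spec : Claim_equal_split_guesses := by
  intro guesses answer _
  have hd : ((PySem.Dict.empty.insert "low" ([] : List Int)).insert "correct" []).insert "high" []
      = PySem.Dict.mk [("low", []), ("correct", []), ("high", [])] := by decide
  simp only [Spec_split_guesses, split_guesses, split_guesses_alt, hd, split_guesses_fold_inv,
    List.nil_append]
  by_cases hl : (guesses.filter (fun n => n < answer)) = [] <;>
    by_cases hh : (guesses.filter (fun n => n > answer)) = [] <;>
      by_cases hc : (guesses.filter (fun n => n == answer)) = [] <;>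
        simp only [gt_iff_lt] at hl hh hc <;>
          simp [hl, hh, hc, PySem.Dict.getD, PySem.Dict.get?, PySem.Dict.erase, PySem.Dict.items,
            List.isEmpty_iff]
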